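-- pv_equiv track=rewrite | github.com/HyogyuAhn/codetree-TILs | 250525/2개 이상의 알파벳/more-than-one-alphabet.py | checkAlphaCnt
-- ===== SOURCE A (Python) =====
-- def checkAlphaCnt(s):
--     alpha = None
--     for d in s:
--         if alpha != None and alpha != d:
--             return "Yes"
--         elif alpha == None or alpha == d:
--             alpha = d
--         else:
--             return "No"
--     return "No"
-- ===== SOURCE B (Python) =====
-- def checkAlphaCnt(s):
--     return "Yes" if len(set(s)) >= 2 else "No"
-- ===== Notes on version B (the rewrite author's own statement) =====
-- stated objective: idiomatic
-- what changed: Replaces the explicit loop tracking a single previously-seen character with early returns by building the set of distinct characters and comparing its size to 2.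
import Mathlib
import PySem

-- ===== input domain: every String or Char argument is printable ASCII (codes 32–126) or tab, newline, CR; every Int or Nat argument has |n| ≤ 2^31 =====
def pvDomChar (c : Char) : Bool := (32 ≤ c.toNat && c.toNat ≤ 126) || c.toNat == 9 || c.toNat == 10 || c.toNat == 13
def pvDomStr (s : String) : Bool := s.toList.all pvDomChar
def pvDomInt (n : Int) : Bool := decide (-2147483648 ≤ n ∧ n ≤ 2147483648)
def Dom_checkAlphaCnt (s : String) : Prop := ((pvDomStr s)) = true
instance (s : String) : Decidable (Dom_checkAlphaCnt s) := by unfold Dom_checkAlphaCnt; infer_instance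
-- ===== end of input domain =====

-- B replaces A's single-seen-character loop with a distinct-character set compared against size 2 (idiomatic).

-- ===== PORT A =====
-- loop over the characters carrying 'alpha : Option Char' (None = no character seen yet)
def checkAlphaCntGo : List Char → Option Char → String
  | [], _ => "No"
  | d :: rest, alpha =>
      if alpha ≠ none ∧ alpha ≠ some d then "Yes"
      else if alpha = none ∨ alpha = some d then checkAlphaCntGo rest (some d)
      else "No"

def checkAlphaCnt (s : String) : String :=
  checkAlphaCntGo s.toList none

-- ===== PORT B =====
def checkAlphaCnt_alt (s : String) : String :=
  if PySem.Set.len (PySem.Set.ofList s.toList) ≥ 2 then "Yes" else "No"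

-- ===== PRECONDITION & SPEC =====
def Spec_checkAlphaCnt (s : String) (out : String) : Prop := out = checkAlphaCnt_alt s
instance (s : String) (out : String) : Decidable (Spec_checkAlphaCnt s out) := by unfold Spec_checkAlphaCnt; infer_instance

-- ===== CLAIM (what is proved, stated in full; the proofs are below) =====
def Claim_equal_checkAlphaCnt : Prop := ∀ (s : String), Dom_checkAlphaCnt s → Spec_checkAlphaCnt s (checkAlphaCnt s)

-- ===== LEMMAS AND PROOFS =====

-- A's loop after the first character: "No" iff every remaining character equals the last seen one
theorem goA_some (l : List Char) : ∀ a : Char,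
    checkAlphaCntGo l (some a) = if l.all (· = a) then "No" else "Yes" := by
  induction l with
  | nil => intro a; simp [checkAlphaCntGo]
  | cons d rest ih =>
      intro a
      by_cases h : a = d
      · subst h
        simp [checkAlphaCntGo, ih]
      · simp [checkAlphaCntGo, h, Ne.symm h]

theorem ofList_all_eq (a : Char) : ∀ m : List Char, m.all (· = a) → PySem.Set.ofList (a :: m) = [a] := by
  intro m
  induction m with
  | nil => intro _; rfl
  | cons b rest ih =>
      intro hb
      simp only [List.all_cons, Bool.and_eq_true, decide_eq_true_eq] at hb
      obtain ⟨hb1, hb2⟩ := hb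
      subst hb1
      have h2 : PySem.Set.ofList (b :: b :: rest) = PySem.Set.ofList (b :: rest) := by
        simp [PySem.Set.ofList_eq_foldl, PySem.Set.add, PySem.Set.contains, List.foldl]
      rw [h2]; exact ih hb2

theorem set_ofList_cons_len (a : Char) (l : List Char) :
    (2 ≤ PySem.Set.len (PySem.Set.ofList (a :: l))) ↔ ¬ l.all (· = a) := by
  constructor
  · intro h hall
    have : PySem.Set.ofList (a :: l) = [a] := ofList_all_eq a l hall
    rw [this] at h
    simp [PySem.Set.len] at h
  · intro hnall
    simp only [List.all_eq_true, decide_eq_true_eq, not_forall] at hnall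
    obtain ⟨c, hc, hne⟩ := hnall
    have ha : a ∈ PySem.Set.ofList (a :: l) := by
      rw [PySem.Set.mem_ofList]; exact List.mem_cons_self
    have hcm : c ∈ PySem.Set.ofList (a :: l) := by
      rw [PySem.Set.mem_ofList]; exact List.mem_cons_of_mem _ hc
    have hnd : (PySem.Set.ofList (a :: l)).Nodup := PySem.Set.nodup_ofList _
    unfold PySem.Set.len
    rcases hs : PySem.Set.ofList (a :: l) with _ | ⟨x, _ | ⟨y, t⟩⟩
    · rw [hs] at ha; simp at ha
    · rw [hs] at ha hcm
      simp only [List.mem_singleton] at ha hcm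
      exact absurd (hcm.trans ha.symm) hne
    · simp
      omega

-- ===== VERDICT (by name: the statement is the Claim_ definition above) =====
theorem checkAlphaCnt_spec : Claim_equal_checkAlphaCnt := by
  intro s _
  unfold Spec_checkAlphaCnt checkAlphaCnt checkAlphaCnt_alt
  cases hl : s.toList with
  | nil => rfl
  | cons a l =>
      have h1 : checkAlphaCntGo (a :: l) none = checkAlphaCntGo l (some a) := by
        simp [checkAlphaCntGo]
      rw [h1, goA_some]
      by_cases h : l.all (· = a)
      · have : ¬ (2 ≤ PySem.Set.len (PySem.Set.ofList (a :: l))) := by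
          rw [set_ofList_cons_len]; simpa using h
        simp [PySem.Set.len] at this
        simp [h, this]
      · have : 2 ≤ PySem.Set.len (PySem.Set.ofList (a :: l)) := by
          rw [set_ofList_cons_len]; simpa using h
        simp [PySem.Set.len] at this
        simp [h, this]
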